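-- pv_equiv track=rewrite | github.com/yamaton/CodeForces | problemSet/570C-Replacement.py | solve
-- ===== SOURCE A (Python) =====
-- import itertools as it
--
-- DOT = '.'
--
-- BAR = '|'
--
-- def solve(s, pairs):
--     # xs is called with 1-based index.
--     n = len(s)
--     # 0-th and (n+1)-th elements are guards.
--     xs = [BAR] + [DOT if c == DOT else BAR for c in s] + [BAR]
--     idx_char_pairs = [(int(x), DOT if c == DOT else BAR) for (x, c) in pairs]  # 1-based index
--     counts = [sum(1 for _ in iterable) for c, iterable in it.groupby(xs) if c == DOT]
--     total = sum(counts) - len(counts)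
--     n = len(xs)
--     # print_stderr(''.join(xs), total)
--
--     result = []
--     for idx, c in idx_char_pairs:
--         # print_stderr('At idx {}: {} -> {}'.format(idx, xs[idx], c))
--         if xs[idx] == c:                          # no change
--             pass
--         elif xs[idx] == DOT:     # . -> |
--             xs[idx] = BAR
--             if xs[idx - 1] ==  xs[idx + 1] == DOT:
--                 #  ... -> .|.
--                 total -= 2
--             elif xs[idx - 1] == DOT or xs[idx + 1] == DOT:
--                 #  |.. -> ||.
--                 total -= 1
--             else:
--                 # |.|  ->  |||
--                 pass
--
--         elif xs[idx] == BAR:       # | -> .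
--             xs[idx] = DOT
--             if xs[idx - 1] == xs[idx + 1] == DOT:
--                 # .|.  -> ...
--                 total += 2
--             elif xs[idx - 1] == DOT or xs[idx + 1] == DOT:
--                 # .|| -> ..|
--                 total += 1
--             else:
--                 # ||| -> |.|
--                 pass
--
--         result.append(total)
--         # print_stderr(''.join(xs), total)
--
--     return result
-- ===== SOURCE B (Python) =====
-- def solve(s, pairs):
--     # No incremental counter: keep booleans ("is this cell a dot"), apply each
--     # replacement, then recount adjacent dot pairs from scratch for every query.
--     cells = [c == '.' for c in s]
--     result = []
--     for x, ch in pairs: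
--         cells[int(x) - 1] = (ch == '.')
--         result.append(sum(1 for a, b in zip(cells, cells[1:]) if a and b))
--     return result
-- ===== Notes on version B (the rewrite author's own statement) =====
-- stated objective: simpler
-- what changed: B abandons A's O(1)-incremental strategy entirely: it keeps a plain boolean array (is this cell a dot), has no guards and no running total, applies each replacement and then recounts the adjacent dot pairs from scratch for every query.
-- outside the precondition, e.g. on solve('..', [('0', '|')]): A returns [1], B returns [0]; on solve('..', [('-1', '.')]): A returns [2], B returns [1]
import Mathlib
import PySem

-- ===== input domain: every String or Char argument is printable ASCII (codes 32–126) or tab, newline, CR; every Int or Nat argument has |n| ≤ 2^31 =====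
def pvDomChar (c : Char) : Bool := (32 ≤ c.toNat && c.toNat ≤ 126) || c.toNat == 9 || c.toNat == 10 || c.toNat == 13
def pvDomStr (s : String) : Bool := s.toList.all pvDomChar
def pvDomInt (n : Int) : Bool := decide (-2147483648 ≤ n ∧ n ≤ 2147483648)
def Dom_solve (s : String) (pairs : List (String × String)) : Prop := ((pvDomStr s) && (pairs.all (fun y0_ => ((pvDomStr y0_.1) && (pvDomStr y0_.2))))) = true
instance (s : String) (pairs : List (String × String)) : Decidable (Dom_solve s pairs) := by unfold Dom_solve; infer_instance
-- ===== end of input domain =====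

-- B drops A's guarded array and incremental counter: it keeps a plain boolean array and
-- recounts adjacent dot pairs from scratch after each replacement (objective: simpler).
-- Equivalence is about the return value; the Python A mutates no argument (xs is local).

-- ===== PORT A =====
-- hand port of itertools.groupby as (key, run length) pairs — A only uses the lengths
def pvGroupRuns : List Char → List (Char × Int)
  | [] => []
  | [a] => [(a, 1)]
  | a :: b :: t =>
    if a = b then
      match pvGroupRuns (b :: t) with
      | (c, k) :: r => (c, k + 1) :: r
      | [] => []
    else (a, 1) :: pvGroupRuns (b :: t)

def pvBuild (s : String) : List Char :=
  ['|'] ++ s.toList.map (fun c => if c = '.' then '.' else '|') ++ ['|']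

def pvCounts (xs : List Char) : List Int :=
  (pvGroupRuns xs).filterMap (fun p => if p.1 = '.' then some p.2 else none)

def pvStepA (st : List Char × Int × List Int) (p : Int × Char) : List Char × Int × List Int :=
  let xs := st.1
  let total := st.2.1
  let res := st.2.2
  let idx := p.1
  let c := p.2
  let old := PySem.List.pyGetD xs idx ' '   -- total form; Pre_ keeps idx in range
  if old = c then (xs, total, res ++ [total])
  else if old = '.' then
    let xs' := PySem.List.pySetD xs idx '|'
    let l := PySem.List.pyGetD xs' (idx - 1) ' '
    let r := PySem.List.pyGetD xs' (idx + 1) ' '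
    let total' := if l = '.' ∧ r = '.' then total - 2
      else if l = '.' ∨ r = '.' then total - 1 else total
    (xs', total', res ++ [total'])
  else if old = '|' then
    let xs' := PySem.List.pySetD xs idx '.'
    let l := PySem.List.pyGetD xs' (idx - 1) ' '
    let r := PySem.List.pyGetD xs' (idx + 1) ' '
    let total' := if l = '.' ∧ r = '.' then total + 2
      else if l = '.' ∨ r = '.' then total + 1 else total
    (xs', total', res ++ [total'])
  else (xs, total, res ++ [total])

def solve (s : String) (pairs : List (String × String)) : List Int :=
  let xs := pvBuild s
  -- int(x) raises outside Pre_; total form via getD 0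
  let icp := pairs.map (fun p => ((PySem.Int.ofStr? p.1).getD 0, if p.2 = "." then '.' else '|'))
  let counts := pvCounts xs
  let total := counts.sum - (counts.length : Int)
  (icp.foldl pvStepA (xs, total, [])).2.2

-- ===== PORT B =====
-- sum(1 for a,b in zip(cells, cells[1:]) if a and b): a 0/1-sum is countP
def pvCnt (cells : List Bool) : Int :=
  ((cells.zip (PySem.List.slice cells (some 1) none)).countP (fun q => q.1 && q.2) : Int)

def pvStepB (st : List Bool × List Int) (p : String × String) : List Bool × List Int :=
  -- cells[int(x) - 1] = (ch == '.'); int(x) raises outside Pre_ (total form via getD 0)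
  let cells := PySem.List.pySetD st.1 ((PySem.Int.ofStr? p.1).getD 0 - 1) (p.2 == ".")
  (cells, st.2 ++ [pvCnt cells])

def solve_alt (s : String) (pairs : List (String × String)) : List Int :=
  (pairs.foldl pvStepB (s.toList.map (fun c => c == '.'), [])).2

-- ===== PRECONDITION & SPEC =====
-- Pre_ restricts queries to the problem's natural domain: each index string parses as an
-- int with 1 ≤ idx ≤ len(s) (the 1-based positions of s). A also RAISES on non-int
-- strings and far-out-of-range indices; on the remaining excluded indices (guard cells 0
-- and n+1, negative wraparound) A returns a value produced by overwriting its guard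
-- cells, which B (having no guards) does not reproduce.
def Pre_solve (s : String) (pairs : List (String × String)) : Prop :=
  ∀ p ∈ pairs, (PySem.Int.ofStr? p.1).isSome = true ∧
    1 ≤ (PySem.Int.ofStr? p.1).getD 0 ∧
    (PySem.Int.ofStr? p.1).getD 0 ≤ (PySem.Str.len s : Int)
instance (s : String) (pairs : List (String × String)) : Decidable (Pre_solve s pairs) := by
  unfold Pre_solve; infer_instance

def pvWitness_solve : String × (List (String × String)) := (".|.", [("2", "."), ("1", "|")])

def Spec_solve (s : String) (pairs : List (String × String)) (out : List Int) : Prop := out = solve_alt s pairs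
instance (s : String) (pairs : List (String × String)) (out : List Int) : Decidable (Spec_solve s pairs out) := by unfold Spec_solve; infer_instance

-- ===== CLAIM (what is proved, stated in full; the proofs are below) =====
def Claim_equal_solve : Prop := ∀ (s : String) (pairs : List (String × String)), Dom_solve s pairs → Pre_solve s pairs → Spec_solve s pairs (solve s pairs)

-- ===== LEMMAS AND PROOFS =====

-- A's xs viewed through B's booleans: guards around the dot-mask
def pvB2c (b : Bool) : Char := if b then '.' else '|'
def pvGuard (cells : List Bool) : List Char := '|' :: cells.map pvB2c ++ ['|']

-- adjacent-dot-pair count on char arrays (proof tool relating both programs)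
def pvAdjCount (xs : List Char) : Int :=
  ((xs.zip (PySem.List.slice xs (some 1) none)).countP (fun p => p.1 == '.' && p.2 == '.') : Int)

-- first group of pvGroupRuns (a :: t) is keyed by a
theorem pv_groupRuns_head (t : List Char) (a : Char) :
    ∃ k r, pvGroupRuns (a :: t) = (a, k) :: r := by
  induction t generalizing a with
  | nil => exact ⟨1, [], rfl⟩
  | cons b t ih =>
    obtain ⟨k, r, hk⟩ := ih b
    by_cases h : a = b
    · subst h; exact ⟨k + 1, r, by simp [pvGroupRuns, hk]⟩
    · exact ⟨1, pvGroupRuns (b :: t), by simp [pvGroupRuns, h]⟩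

theorem pv_slice1 {α : Type} (ys : List α) : PySem.List.slice ys (some 1) none = ys.drop 1 := by
  simpa using PySem.List.slice_from_natCast ys 1

theorem pv_adj_nil : pvAdjCount [] = 0 := by simp [pvAdjCount, pv_slice1]

theorem pv_adj_single (a : Char) : pvAdjCount [a] = 0 := by simp [pvAdjCount, pv_slice1]

theorem pv_adj_cons (a b : Char) (t : List Char) :
    pvAdjCount (a :: b :: t) =
      (if a = '.' ∧ b = '.' then 1 else 0) + pvAdjCount (b :: t) := by
  simp only [pvAdjCount, pv_slice1, List.drop_one, List.tail_cons, List.zip_cons_cons,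
    List.countP_cons]
  by_cases h1 : a = '.' <;> by_cases h2 : b = '.' <;>
    simp [h1, h2] <;> try (push_cast; ring)

-- A's initial total (groupby run lengths) equals the adjacent-dot-pair count
theorem pv_init_eq (xs : List Char) :
    (pvCounts xs).sum - ((pvCounts xs).length : Int) = pvAdjCount xs := by
  induction xs with
  | nil => simp [pvCounts, pvGroupRuns, pv_adj_nil]
  | cons a t ih =>
    cases t with
    | nil =>
      by_cases ha : a = '.' <;> simp [pvCounts, pvGroupRuns, pv_adj_single, ha]
    | cons b t' =>
      obtain ⟨k, r, hk⟩ := pv_groupRuns_head t' b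
      rw [pv_adj_cons]
      by_cases hab : a = b
      · subst hab
        have hg2 : pvGroupRuns (a :: a :: t') = (a, k + 1) :: r := by
          simp [pvGroupRuns, hk]
        simp only [pvCounts, hg2, hk, List.filterMap_cons] at ih ⊢
        by_cases ha : a = '.' <;> simp [ha] at ih ⊢ <;>
          try (push_cast at ih ⊢; omega)
      · have hg2 : pvGroupRuns (a :: b :: t') = (a, 1) :: pvGroupRuns (b :: t') := by
          simp [pvGroupRuns, hab]
        have hnb : ¬ (a = '.' ∧ b = '.') := by
          rintro ⟨h1, h2⟩; exact hab (h1.trans h2.symm)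
        simp only [pvCounts, hg2, List.filterMap_cons, hnb, reduceIte] at ih ⊢
        by_cases ha : a = '.' <;> simp only [ha, reduceIte] at ih ⊢ <;>
          simp at ih ⊢ <;> try (push_cast at ih ⊢; omega)

theorem pv_cnt_nil : pvCnt [] = 0 := by simp [pvCnt, pv_slice1]
theorem pv_cnt_single (a : Bool) : pvCnt [a] = 0 := by simp [pvCnt, pv_slice1]
theorem pv_cnt_cons (a b : Bool) (t : List Bool) :
    pvCnt (a :: b :: t) = (if a ∧ b then 1 else 0) + pvCnt (b :: t) := by
  simp only [pvCnt, pv_slice1, List.drop_one, List.tail_cons, List.zip_cons_cons,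
    List.countP_cons]
  cases a <;> cases b <;> simp <;> try (push_cast; ring)

-- recount on the guarded char array = B's boolean recount
theorem pv_adj_tail (l : List Bool) :
    pvAdjCount (l.map pvB2c ++ ['|']) = pvCnt l := by
  induction l with
  | nil => simpa using pv_adj_single '|'
  | cons a t ih =>
    cases t with
    | nil =>
      rw [pv_cnt_single]
      cases a <;> simp [pvB2c, pv_adj_cons, pv_adj_single]
    | cons b t' =>
      rw [pv_cnt_cons]
      simp only [List.map_cons, List.cons_append] at ih ⊢
      rw [pv_adj_cons, ih]
      cases a <;> cases b <;> simp [pvB2c]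

theorem pv_guard_adj (l : List Bool) : pvAdjCount (pvGuard l) = pvCnt l := by
  cases l with
  | nil => simp [pvGuard, pv_cnt_nil]; decide
  | cons a t =>
    rw [pvGuard, ← pv_adj_tail (a :: t)]
    simp only [List.map_cons, List.cons_append, List.singleton_append]
    rw [pv_adj_cons]
    cases a <;> simp [pvB2c]

-- delta of the adjacent-pair count under a single interior write
theorem pv_adj_set (xs : List Char) (n : Nat) (v : Char)
    (h1 : 1 ≤ n) (h2 : n + 2 ≤ xs.length) :
    pvAdjCount (xs.set n v)
      = pvAdjCount xs
        + ((if xs.getD (n-1) ' ' = '.' ∧ v = '.' then 1 else 0)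
           - (if xs.getD (n-1) ' ' = '.' ∧ xs.getD n ' ' = '.' then 1 else 0))
        + ((if v = '.' ∧ xs.getD (n+1) ' ' = '.' then 1 else 0)
           - (if xs.getD n ' ' = '.' ∧ xs.getD (n+1) ' ' = '.' then 1 else 0)) := by
  induction xs generalizing n with
  | nil => simp at h2
  | cons a t ih =>
    match n, h1 with
    | 1, _ =>
      match t, h2 with
      | b :: c :: t', _ =>
        simp only [List.set_cons_succ, List.set_cons_zero,
          show (1:Nat) - 1 = 0 from rfl, show (1:Nat) + 1 = 2 from rfl,
          List.getD_cons_succ, List.getD_cons_zero]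
        rw [pv_adj_cons, pv_adj_cons, pv_adj_cons, pv_adj_cons]
        split_ifs <;> omega
    | (m+2), _ =>
      match t, h2 with
      | b :: t', h2 =>
        have h2' : (m+1) + 2 ≤ (b :: t').length := by
          simp only [List.length_cons] at h2 ⊢; omega
        have hih := ih (m+1) (by omega) h2'
        simp only [Nat.add_sub_cancel, List.set_cons_succ, List.getD_cons_succ] at hih
        simp only [show m + 2 - 1 = m + 1 from rfl, show m + 2 + 1 = (m + 2) + 1 from rfl,
          List.set_cons_succ, List.getD_cons_succ]
        rw [pv_adj_cons, pv_adj_cons, hih]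
        ring

theorem pv_guard_length (cells : List Bool) : (pvGuard cells).length = cells.length + 2 := by
  simp [pvGuard]

theorem pv_guard_getD (cells : List Bool) (m : Nat) (hm : m < cells.length) :
    (pvGuard cells).getD (m+1) ' ' = pvB2c (cells.getD m false) := by
  have h1 : m < (cells.map pvB2c).length := by simpa using hm
  rw [pvGuard, List.cons_append, List.getD_cons_succ,
    List.getD_eq_getElem _ _ (by simp; omega),
    List.getElem_append_left h1, List.getElem_map,
    List.getD_eq_getElem _ _ hm]

theorem pv_guard_set (cells : List Bool) (m : Nat) (w : Bool) (hm : m < cells.length) :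
    (pvGuard cells).set (m+1) (pvB2c w) = pvGuard (cells.set m w) := by
  simp only [pvGuard, List.cons_append, List.set_cons_succ, List.cons.injEq, true_and]
  rw [List.set_append_left _ _ (by simpa using hm), ← List.map_set]

-- one query: A's case-tree update of its running total equals B's full recount
set_option maxHeartbeats 800000 in
theorem pv_step_eq (cells : List Bool) (res : List Int) (p : String × String) (i : Int)
    (hp : PySem.Int.ofStr? p.1 = some i) (h1 : 1 ≤ i) (h2 : i ≤ (cells.length : Int)) :
    pvStepA (pvGuard cells, pvCnt cells, res) (i, if p.2 = "." then '.' else '|')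
      = (pvGuard (pvStepB (cells, res) p).1, pvCnt (pvStepB (cells, res) p).1,
         (pvStepB (cells, res) p).2) := by
  obtain ⟨n, rfl⟩ : ∃ n : Nat, i = (n : Int) :=
    ⟨i.toNat, (Int.toNat_of_nonneg (by omega)).symm⟩
  have hn1 : 1 ≤ n := by exact_mod_cast h1
  have hn2 : n ≤ cells.length := by exact_mod_cast h2
  obtain ⟨m, rfl⟩ : ∃ m : Nat, n = m + 1 := ⟨n - 1, by omega⟩
  have hm : m < cells.length := by omega
  -- the boolean written by B and the char written by A
  obtain ⟨w, hw⟩ : ∃ w : Bool, (p.2 == ".") = w := ⟨_, rfl⟩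
  have hc : (if p.2 = "." then '.' else '|') = pvB2c w := by
    by_cases h : p.2 = "." <;> simp [pvB2c, ← hw, h]
  have hmi : ((m : Int) + 1) - 1 = (m : Int) := by ring
  have hcells' : (pvStepB (cells, res) p).1 = cells.set m w := by
    simp [pvStepB, hp, hmi, PySem.List.pySetD_natCast, hw]
  have hres' : (pvStepB (cells, res) p).2 = res ++ [pvCnt (cells.set m w)] := by
    simp [pvStepB, hp, hmi, PySem.List.pySetD_natCast, hw]
  set xs := pvGuard cells with hxs
  have hlen : xs.length = cells.length + 2 := pv_guard_length cells
  have hold : xs.getD (m+1) ' ' = pvB2c (cells.getD m false) := pv_guard_getD cells m hm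
  have hget : ∀ (k : Nat) (hk : k < xs.length), xs.getD k ' ' = xs[k]'hk :=
    fun k hk => List.getD_eq_getElem xs ' ' hk
  have hgetset : ∀ (v : Char) (k : Nat) (hk : k < xs.length), m + 1 ≠ k →
      (xs.set (m+1) v).getD k ' ' = xs.getD k ' ' := by
    intro v k hk hne
    rw [List.getD_eq_getElem _ ' ' (by simpa using hk), List.getElem_set_ne (by omega),
      List.getD_eq_getElem _ ' ' hk]
  have hsetc : ∀ v : Bool, PySem.List.pySetD xs ((m:Int)+1) (pvB2c v)
      = pvGuard (cells.set m v) := by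
    intro v
    rw [show ((m:Int)+1) = ((m+1 : Nat) : Int) by push_cast; ring,
      PySem.List.pySetD_natCast, pv_guard_set cells m v hm]
  -- recount after the write, via the delta of the pair count
  have hrecount : ∀ v : Bool, pvCnt (cells.set m v)
      = pvCnt cells
        + ((if xs.getD m ' ' = '.' ∧ pvB2c v = '.' then 1 else 0)
           - (if xs.getD m ' ' = '.' ∧ xs.getD (m+1) ' ' = '.' then 1 else 0))
        + ((if pvB2c v = '.' ∧ xs.getD (m+2) ' ' = '.' then 1 else 0)
           - (if xs.getD (m+1) ' ' = '.' ∧ xs.getD (m+2) ' ' = '.' then 1 else 0)) := by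
    intro v
    rw [← pv_guard_adj, ← pv_guard_set cells m v hm, ← pv_guard_adj cells,
      pv_adj_set xs (m+1) (pvB2c v) (by omega) (by omega)]
    simp [hxs]
  have hmm : ((m:Int)+1) - 1 = ((m:Nat) : Int) := by ring
  have hmp : ((m:Int)+1) + 1 = ((m+2 : Nat) : Int) := by push_cast; ring
  have hA1 : ((m+1 : Nat) : Int) - 1 = ((m : Nat) : Int) := by push_cast; ring
  have hA2 : ((m+1 : Nat) : Int) + 1 = ((m+2 : Nat) : Int) := by push_cast; ring
  have hLg : ∀ v : Char, (xs.set (m+1) v).getD m ' ' = xs.getD m ' ' :=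
    fun v => hgetset v m (by omega) (by omega)
  have hRg : ∀ v : Char, (xs.set (m+1) v).getD (m+2) ' ' = xs.getD (m+2) ' ' :=
    fun v => hgetset v (m+2) (by omega) (by omega)
  have hsetc' : ∀ v : Bool, xs.set (m+1) (pvB2c v) = pvGuard (cells.set m v) := by
    intro v
    rw [show xs.set (m+1) (pvB2c v) = PySem.List.pySetD xs ((m:Int)+1) (pvB2c v) by
      rw [show ((m:Int)+1) = ((m+1 : Nat) : Int) by push_cast; ring, PySem.List.pySetD_natCast]]
    exact hsetc v
  have key1 : ∀ (La Ra : Char),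
      (if La = '.' ∧ Ra = '.' then pvCnt cells + 2
        else if La = '.' ∨ Ra = '.' then pvCnt cells + 1 else pvCnt cells)
      = pvCnt cells + ((if La = '.' ∧ True then 1 else 0)
          - if La = '.' ∧ ('|':Char) = '.' then 1 else 0)
        + ((if True ∧ Ra = '.' then 1 else 0)
          - if ('|':Char) = '.' ∧ Ra = '.' then 1 else 0) := by
    intro La Ra
    by_cases hA : La = '.' <;> by_cases hB : Ra = '.' <;> simp [hA, hB] <;> ring
  have key2 : ∀ (La Ra : Char),
      (if La = '.' ∧ Ra = '.' then pvCnt cells - 2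
        else if La = '.' ∨ Ra = '.' then pvCnt cells - 1 else pvCnt cells)
      = pvCnt cells + ((if La = '.' ∧ ('|':Char) = '.' then 1 else 0)
          - if La = '.' ∧ True then 1 else 0)
        + ((if ('|':Char) = '.' ∧ Ra = '.' then 1 else 0)
          - if True ∧ Ra = '.' then 1 else 0) := by
    intro La Ra
    by_cases hA : La = '.' <;> by_cases hB : Ra = '.' <;> simp [hA, hB] <;> ring
  cases hb : cells.getD m false with
  | false =>
    have holdc : xs.getD (m+1) ' ' = '|' := by rw [hold, hb]; rfl
    cases hwv : w with
    | false =>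
      -- no-op: writes the bar back
      have hcells : cells.set m false = cells := by
        conv_lhs => rw [← hb, List.getD_eq_getElem _ _ hm, List.set_getElem_self]
      simp only [pvStepA, hc, hwv, hcells', hres', hcells, PySem.List.pyGetD_natCast]
      rw [holdc]
      simp [pvB2c, hxs]
    | true =>
      -- | -> .
      have hrec := hrecount true
      rw [holdc] at hrec
      simp only [show pvB2c true = '.' from rfl] at hrec
      have htot : (if xs.getD m ' ' = '.' ∧ xs.getD (m+2) ' ' = '.' then pvCnt cells + 2
          else if xs.getD m ' ' = '.' ∨ xs.getD (m+2) ' ' = '.' then pvCnt cells + 1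
          else pvCnt cells) = pvCnt (cells.set m true) := by
        rw [hrec]; exact key1 _ _
      simp only [pvStepA, hc, hwv, hcells', hres', hA1, hA2,
        PySem.List.pyGetD_natCast, PySem.List.pySetD_natCast]
      rw [holdc]
      simp only [show pvB2c true = '.' from rfl, show (('|':Char) = '.') = False by simp,
        if_false, hLg, hRg, htot]
      simp [pvB2c]
      exact hsetc' true
  | true =>
    have holdc : xs.getD (m+1) ' ' = '.' := by rw [hold, hb]; rfl
    cases hwv : w with
    | true =>
      -- no-op: writes the dot back
      have hcells : cells.set m true = cells := by
        conv_lhs => rw [← hb, List.getD_eq_getElem _ _ hm, List.set_getElem_self]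
      simp only [pvStepA, hc, hwv, hcells', hres', hcells, PySem.List.pyGetD_natCast]
      rw [holdc]
      simp [pvB2c, hxs]
    | false =>
      -- . -> |
      have hrec := hrecount false
      rw [holdc] at hrec
      simp only [show pvB2c false = '|' from rfl] at hrec
      have htot : (if xs.getD m ' ' = '.' ∧ xs.getD (m+2) ' ' = '.' then pvCnt cells - 2
          else if xs.getD m ' ' = '.' ∨ xs.getD (m+2) ' ' = '.' then pvCnt cells - 1
          else pvCnt cells) = pvCnt (cells.set m false) := by
        rw [hrec]; exact key2 _ _
      simp only [pvStepA, hc, hwv, hcells', hres', hA1, hA2,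
        PySem.List.pyGetD_natCast, PySem.List.pySetD_natCast]
      rw [holdc]
      simp only [show pvB2c false = '|' from rfl, show (('.':Char) = '|') = False by simp,
        if_false, hLg, hRg, htot]
      simp [pvB2c]
      exact hsetc' false

-- whole loop: A's triple state stays the guarded view of B's pair state
theorem pv_loop_eq (ps : List (String × String)) (cells : List Bool) (res : List Int)
    (hb : ∀ p ∈ ps, ∃ i, PySem.Int.ofStr? p.1 = some i ∧ 1 ≤ i ∧ i ≤ (cells.length : Int)) :
    ((ps.map (fun p => ((PySem.Int.ofStr? p.1).getD 0, if p.2 = "." then '.' else '|'))).foldl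
        pvStepA (pvGuard cells, pvCnt cells, res)).2.2
      = (ps.foldl pvStepB (cells, res)).2 := by
  induction ps generalizing cells res with
  | nil => rfl
  | cons p ps ih =>
    obtain ⟨i, hp, h1, h2⟩ := hb p List.mem_cons_self
    simp only [List.map_cons, List.foldl_cons, hp, Option.getD_some]
    rw [pv_step_eq cells res p i hp h1 h2]
    have hlen : (pvStepB (cells, res) p).1.length = cells.length := by
      simp [pvStepB, PySem.List.length_pySetD]
    rcases hE : pvStepB (cells, res) p with ⟨cells', res'⟩
    rw [hE] at hlen
    exact ih cells' res' (fun q hq => by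
      obtain ⟨j, hj1, hj2, hj3⟩ := hb q (List.mem_cons_of_mem _ hq)
      exact ⟨j, hj1, hj2, by rw [hlen]; exact hj3⟩)

-- ===== VERDICT (by name: the statement is the Claim_ definition above) =====
theorem solve_spec : Claim_equal_solve := by
  intro s pairs _hdom hpre
  unfold Spec_solve
  have hmap : s.toList.map (fun c => if c = '.' then '.' else '|')
      = (s.toList.map (fun c => c == '.')).map pvB2c := by
    rw [List.map_map]
    exact List.map_congr_left (fun c _ => by by_cases h : c = '.' <;> simp [pvB2c, h])
  have hguard : pvBuild s = pvGuard (s.toList.map (fun c => c == '.')) := by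
    simp [pvBuild, pvGuard, hmap]
  have hb : ∀ q ∈ pairs, ∃ i, PySem.Int.ofStr? q.1 = some i ∧ 1 ≤ i ∧
      i ≤ ((s.toList.map (fun c => c == '.')).length : Int) := by
    intro q hq
    obtain ⟨hs, h1, h2⟩ := hpre q hq
    cases hps : PySem.Int.ofStr? q.1 with
    | none => rw [hps] at hs; simp at hs
    | some j =>
      rw [hps] at h1 h2
      simp only [Option.getD_some] at h1 h2
      refine ⟨j, rfl, h1, ?_⟩
      have hlen : PySem.Str.len s = s.toList.length := by simp [PySem.Str.len]
      rw [hlen] at h2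
      simpa using h2
  simp only [solve, solve_alt, hguard]
  rw [pv_init_eq, pv_guard_adj]
  exact pv_loop_eq pairs _ [] hb
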